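-- pv_equiv track=rewrite | github.com/mikikora/University | AI/lista3/zad1.py | sprawdz_ustawienie
-- ===== SOURCE A (Python) =====
-- def sprawdz_ustawienie (row, block):
--     if '?' in row:
--         return False
--     i = 0
--     while i < len(row) and row[i] == '0':
--         i += 1
--     if i >= len(row) and block != []:
--         return False
--     if i >= len(row) and block == []:
--         return True
--     if i < len(row) and block == []:
--         return False
--     dlugosc = 0
--     while i < len(row) and row[i] == '1':
--         dlugosc += 1
--         i += 1
--     if dlugosc == block[0]:
--         return True and sprawdz_ustawienie(row[i:], block[1:])
--     return False
-- ===== SOURCE B (Python) =====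
-- def sprawdz_ustawienie(row, block):
--     # A returns False whenever the row contains any character other than '0'/'1'
--     # (including '?'); otherwise the answer is: run-lengths of '1's equal block.
--     if any(c not in '01' for c in row):
--         return False
--     runs = []
--     cur = 0
--     for c in row:
--         if c == '1':
--             cur += 1
--         elif cur:
--             runs.append(cur)
--             cur = 0
--     if cur:
--         runs.append(cur)
--     return runs == block
-- ===== Notes on version B (the rewrite author's own statement) =====
-- stated objective: simpler
-- what changed: Replaces A's interleaved skip-zeros/count-ones/recurse-on-slice with a single linear pass that builds the run-length list of '1' runs and compares it to block (non-'0'/'1' characters, on which A always ends up returning False, are rejected up front).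
import Mathlib
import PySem

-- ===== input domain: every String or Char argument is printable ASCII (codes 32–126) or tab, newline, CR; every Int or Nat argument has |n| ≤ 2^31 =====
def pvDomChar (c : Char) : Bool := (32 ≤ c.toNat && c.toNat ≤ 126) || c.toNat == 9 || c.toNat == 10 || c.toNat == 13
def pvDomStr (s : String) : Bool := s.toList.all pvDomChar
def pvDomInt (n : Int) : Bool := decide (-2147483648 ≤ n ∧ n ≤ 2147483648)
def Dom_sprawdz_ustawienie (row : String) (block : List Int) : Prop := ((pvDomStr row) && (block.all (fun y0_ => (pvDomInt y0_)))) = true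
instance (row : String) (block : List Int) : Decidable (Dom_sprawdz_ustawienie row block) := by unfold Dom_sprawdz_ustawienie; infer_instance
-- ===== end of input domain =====

-- B replaces A's skip/count/recurse with one pass building the '1'-run-length list and comparing it to block (objective: simpler).

-- ===== PORT A =====
-- `while i < len(row) and row[i] == '0': i += 1` — the suffix from the first non-'0' char
def skipZerosA : List Char → List Char
  | [] => []
  | c :: cs => if c = '0' then skipZerosA cs else c :: cs

-- `while i < len(row) and row[i] == '1': dlugosc += 1; i += 1` — (dlugosc, remaining suffix)
def countOnesA : List Char → Int × List Char
  | [] => (0, [])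
  | c :: cs => if c = '1' then ((countOnesA cs).1 + 1, (countOnesA cs).2) else (0, c :: cs)

theorem skipZerosA_length_le (l : List Char) : (skipZerosA l).length ≤ l.length := by
  induction l with
  | nil => simp [skipZerosA]
  | cons c cs ih => simp only [skipZerosA]; split <;> simp <;> omega

theorem countOnesA_length_le (l : List Char) : (countOnesA l).2.length ≤ l.length := by
  induction l with
  | nil => simp [countOnesA]
  | cons c cs ih => simp only [countOnesA]; split <;> simp <;> omega

def sprA (l : List Char) (block : List Int) : Bool :=
  if '?' ∈ l then false
  else
    let l1 := skipZerosA l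
    if l1 = [] ∧ block ≠ [] then false
    else if l1 = [] ∧ block = [] then true
    else if h3 : block = [] then false
    else
      let p := countOnesA l1
      if p.1 = block.head! then sprA p.2 block.tail else false
termination_by l.length + block.length
decreasing_by
  have h1 := skipZerosA_length_le l
  have h2 := countOnesA_length_le (skipZerosA l)
  have h4 : block.tail.length = block.length - 1 := List.length_tail
  have h5 : block.length ≠ 0 := by simpa using h3
  omega

def sprawdz_ustawienie (row : String) (block : List Int) : Bool := sprA row.toList block

-- ===== PORT B =====
def stepB (st : List Int × Int) (c : Char) : List Int × Int :=
  if c = '1' then (st.1, st.2 + 1)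
  else if st.2 ≠ 0 then (st.1 ++ [st.2], 0)
  else (st.1, 0)

def sprawdz_ustawienie_alt (row : String) (block : List Int) : Bool :=
  if row.toList.any (fun c => ¬(c = '0' ∨ c = '1')) then false
  else
    let st := row.toList.foldl stepB ([], 0)
    let runs := if st.2 ≠ 0 then st.1 ++ [st.2] else st.1
    decide (runs = block)

-- ===== PRECONDITION & SPEC =====
def Spec_sprawdz_ustawienie (row : String) (block : List Int) (out : Bool) : Prop := out = sprawdz_ustawienie_alt row block
instance (row : String) (block : List Int) (out : Bool) : Decidable (Spec_sprawdz_ustawienie row block out) := by unfold Spec_sprawdz_ustawienie; infer_instance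

-- ===== CLAIM (what is proved, stated in full; the proofs are below) =====
def Claim_equal_sprawdz_ustawienie : Prop := ∀ (row : String) (block : List Int), Dom_sprawdz_ustawienie row block → Spec_sprawdz_ustawienie row block (sprawdz_ustawienie row block)

-- ===== LEMMAS AND PROOFS =====

-- proof-side reference function: run-lengths of '1' runs, starting with a current run of length k
def runsFrom (k : Int) : List Char → List Int
  | [] => if k ≠ 0 then [k] else []
  | c :: cs => if c = '1' then runsFrom (k + 1) cs
               else if k ≠ 0 then k :: runsFrom 0 cs else runsFrom 0 cs

theorem foldB_runsFrom (l : List Char) : ∀ (acc : List Int) (k : Int),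
    (let st := l.foldl stepB (acc, k);
     if st.2 ≠ 0 then st.1 ++ [st.2] else st.1) = acc ++ runsFrom k l := by
  induction l with
  | nil => intro acc k; simp [runsFrom]; split <;> simp
  | cons c cs ih =>
    intro acc k
    simp only [List.foldl_cons, runsFrom, stepB]
    by_cases hc : c = '1'
    · simp [hc, ih]
    · by_cases hk : k ≠ 0 <;> simp [hc, hk, ih]

theorem skipZerosA_subset {c : Char} {l : List Char} (h : c ∈ l) (hc : c ≠ '0') :
    c ∈ skipZerosA l := by
  induction l with
  | nil => simp at h
  | cons d ds ih =>
    simp only [skipZerosA]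
    rcases List.mem_cons.mp h with h | h
    · subst h; simp [hc]
    · split
      · exact ih h
      · exact List.mem_cons_of_mem _ h

theorem skipZerosA_mem {c : Char} {l : List Char} (h : c ∈ skipZerosA l) : c ∈ l := by
  induction l with
  | nil => simpa [skipZerosA] using h
  | cons d ds ih =>
    simp only [skipZerosA] at h
    split at h
    · exact List.mem_cons_of_mem _ (ih h)
    · exact h

theorem countOnesA_subset {c : Char} {l : List Char} (h : c ∈ l) (hc : c ≠ '1') :
    c ∈ (countOnesA l).2 := by
  induction l with
  | nil => simp at h
  | cons d ds ih =>
    simp only [countOnesA]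
    rcases List.mem_cons.mp h with h | h
    · subst h; simp [hc]
    · split
      · exact ih h
      · exact List.mem_cons_of_mem _ h

theorem countOnesA_mem {c : Char} {l : List Char} (h : c ∈ (countOnesA l).2) : c ∈ l := by
  induction l with
  | nil => simpa [countOnesA] using h
  | cons d ds ih =>
    simp only [countOnesA] at h
    split at h
    · exact List.mem_cons_of_mem _ (ih h)
    · exact h

theorem skipZerosA_head {c : Char} {cs l : List Char} (h : skipZerosA l = c :: cs) : c ≠ '0' := by
  induction l with
  | nil => simp [skipZerosA] at h
  | cons d ds ih =>
    simp only [skipZerosA] at h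
    split at h
    · exact ih h
    · rename_i hd
      injection h with h1 _
      exact h1 ▸ hd

theorem countOnesA_lt {c : Char} {cs : List Char} (h : c = '1') :
    (countOnesA (c :: cs)).2.length < (c :: cs).length := by
  simp only [countOnesA, h, if_pos rfl]
  have := countOnesA_length_le cs
  simp; omega

theorem runsFrom_skipZeros (l : List Char) : runsFrom 0 l = runsFrom 0 (skipZerosA l) := by
  induction l with
  | nil => simp [skipZerosA]
  | cons c cs ih =>
    simp only [skipZerosA]
    by_cases hc : c = '0'
    · have hc1 : c ≠ '1' := by subst hc; decide
      simp [hc, runsFrom, hc1, ih]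
    · simp [hc]

theorem runsFrom_countOnes (l : List Char) : ∀ (k : Int), 0 ≤ k →
    (k ≠ 0 ∨ l.head? = some '1') →
    runsFrom k l = (k + (countOnesA l).1) :: runsFrom 0 (countOnesA l).2 := by
  induction l with
  | nil =>
    intro k hk h
    have : k ≠ 0 := by rcases h with h | h; exact h; simp at h
    simp [runsFrom, countOnesA, this]
  | cons c cs ih =>
    intro k hk h
    by_cases hc : c = '1'
    · have h2 : (0:Int) ≤ k + 1 := by omega
      have h3 : k + 1 ≠ 0 := by omega
      simp only [runsFrom, hc, countOnesA, if_pos trivial]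
      rw [ih (k + 1) h2 (Or.inl h3)]
      congr 1
      omega
    · have hk0 : k ≠ 0 := by
        rcases h with h | h
        · exact h
        · exact absurd (by simpa using h) hc
      simp [runsFrom, hc, hk0, countOnesA]

-- A returns false whenever the row contains a character other than '0'/'1'
theorem sprA_bad (block : List Int) : ∀ (l : List Char) (c : Char), c ∈ l → c ≠ '0' → c ≠ '1' →
    sprA l block = false := by
  induction block with
  | nil =>
    intro l c hmem h0 h1
    rw [sprA]
    by_cases hq : '?' ∈ l
    · simp [hq]
    · have hne : skipZerosA l ≠ [] := by
        intro he; have := skipZerosA_subset hmem h0; rw [he] at this; simp at this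
      simp [hq, hne]
  | cons b bs ih =>
    intro l c hmem h0 h1
    rw [sprA]
    by_cases hq : '?' ∈ l
    · simp [hq]
    · have hne : skipZerosA l ≠ [] := by
        intro he; have := skipZerosA_subset hmem h0; rw [he] at this; simp at this
      have hrest : c ∈ (countOnesA (skipZerosA l)).2 :=
        countOnesA_subset (skipZerosA_subset hmem h0) h1
      simp [hq, hne, ih _ c hrest h0 h1]

-- A on binary rows equals run-length comparison
theorem sprA_good : ∀ (n : Nat) (l : List Char) (block : List Int), l.length ≤ n →
    (∀ c ∈ l, c = '0' ∨ c = '1') →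
    sprA l block = decide (runsFrom 0 l = block) := by
  intro n
  induction n with
  | zero =>
    intro l block hlen hbin
    have hl : l = [] := by
      cases l with
      | nil => rfl
      | cons a as => simp at hlen
    subst hl
    rw [sprA]
    cases block with
    | nil => simp [skipZerosA, runsFrom]
    | cons b bs => simp [skipZerosA, runsFrom]
  | succ n ih =>
    intro l block hlen hbin
    rw [sprA]
    have hq : ¬ '?' ∈ l := by
      intro h; rcases hbin _ h with h | h <;> simp at h
    rcases hsk : skipZerosA l with _ | ⟨c, cs⟩
    · -- all zeros
      have hrl : runsFrom 0 l = [] := by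
        rw [runsFrom_skipZeros, hsk]; simp [runsFrom]
      cases block with
      | nil => simp [hq, hsk, hrl]
      | cons b bs => simp [hq, hsk, hrl]
    · have hc1 : c = '1' := by
        have h0 := skipZerosA_head hsk
        have hm : c ∈ l := skipZerosA_mem (by rw [hsk]; simp)
        rcases hbin _ hm with h | h
        · exact absurd h h0
        · exact h
      have hco : runsFrom 0 (c :: cs) =
          ((countOnesA (c :: cs)).1) :: runsFrom 0 (countOnesA (c :: cs)).2 := by
        have := runsFrom_countOnes (c :: cs) 0 le_rfl (Or.inr (by simp [hc1]))
        simpa using this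
      have hrl : runsFrom 0 l = ((countOnesA (c :: cs)).1) :: runsFrom 0 (countOnesA (c :: cs)).2 := by
        rw [runsFrom_skipZeros, hsk, hco]
      have hrestlen : (countOnesA (c :: cs)).2.length ≤ n := by
        have h1 := countOnesA_lt (cs := cs) hc1
        have h2 := skipZerosA_length_le l
        rw [hsk] at h2
        omega
      have hrestbin : ∀ d ∈ (countOnesA (c :: cs)).2, d = '0' ∨ d = '1' := by
        intro d hd
        exact hbin d (skipZerosA_mem (hsk ▸ countOnesA_mem hd))
      cases block with
      | nil => simp [hq, hsk, hrl]
      | cons b bs =>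
        simp only [hq, hsk]
        simp [hrl]
        rw [ih _ bs hrestlen hrestbin]

-- ===== VERDICT (by name: the statement is the Claim_ definition above) =====
theorem sprawdz_ustawienie_spec : Claim_equal_sprawdz_ustawienie := by
  intro row block _
  unfold Spec_sprawdz_ustawienie sprawdz_ustawienie sprawdz_ustawienie_alt
  by_cases hbad : ∃ c ∈ row.toList, ¬(c = '0' ∨ c = '1')
  · obtain ⟨c, hmem, hc⟩ := hbad
    push_neg at hc
    rw [sprA_bad block row.toList c hmem hc.1 hc.2]
    rw [if_pos (by simpa using ⟨c, hmem, hc⟩)]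
  · push_neg at hbad
    rw [sprA_good row.toList.length row.toList block le_rfl hbad]
    rw [if_neg (by
      simp
      intro x hx h0
      exact (hbad x hx).resolve_left h0)]
    have := foldB_runsFrom row.toList [] 0
    simp only at this
    simp [this]
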